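-- pv_equiv track=rewrite | github.com/fernandoaafonseca/daily-coding | courses/course-03-cs50p/problem_28-week_5_(unit_tests)-03_re_requesting_a_vanity_plate/plates.py | are_numbers_at_the_end
-- ===== SOURCE A (Python) =====
-- def are_numbers_at_the_end(user_plate: str) -> bool:
--     '''
--     Checks if the numbers are at the end of the plate.
--     '''
--     found_number = False
--
--     for char in user_plate:
--         if char.isdigit():
--             found_number = True
--         elif found_number:
--             # If the char is not a digit and "found_number" was set to "True" before, i.e. if there's a letter after a number
--             return False
--
--     # If there's no letter after a number
--     return True
-- ===== SOURCE B (Python) =====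
-- def are_numbers_at_the_end(user_plate: str) -> bool:
--     # Strip the trailing run of digits, then require the remaining prefix digit-free.
--     i = len(user_plate)
--     while i > 0 and user_plate[i - 1].isdigit():
--         i -= 1
--     return not any(c.isdigit() for c in user_plate[:i])
-- ===== Notes on version B (the rewrite author's own statement) =====
-- stated objective: alternative
-- what changed: Replaces the flag-tracking single pass with early return by a two-phase scan: strip the trailing run of digits from the right, then check the remaining prefix contains no digit.
import Mathlib
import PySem

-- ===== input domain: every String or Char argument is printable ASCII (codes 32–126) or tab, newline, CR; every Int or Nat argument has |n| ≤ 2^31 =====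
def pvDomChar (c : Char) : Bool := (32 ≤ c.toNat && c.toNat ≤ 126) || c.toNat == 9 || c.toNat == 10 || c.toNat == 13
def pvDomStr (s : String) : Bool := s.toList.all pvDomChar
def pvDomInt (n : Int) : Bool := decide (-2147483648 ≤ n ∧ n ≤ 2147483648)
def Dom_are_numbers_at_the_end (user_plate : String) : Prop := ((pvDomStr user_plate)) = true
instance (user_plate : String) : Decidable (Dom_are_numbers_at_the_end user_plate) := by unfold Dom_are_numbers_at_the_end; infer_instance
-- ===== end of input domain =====

-- B replaces A's flag-tracking single pass by a two-phase scan (strip trailing digits from the right, then check the prefix is digit-free); same behaviour, alternative decomposition.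


-- ===== PORT A =====
-- the for-loop over the characters with the found_number flag; early 'return False' = result false
def pvALoop : List Char → Bool → Bool
  | [], _ => true
  | c :: cs, found =>
    if PySem.Chars.isdigit c then pvALoop cs true
    else if found then false
    else pvALoop cs found

def are_numbers_at_the_end (user_plate : String) : Bool :=
  pvALoop user_plate.toList false

-- ===== PORT B =====
-- the while loop 'while i > 0 and user_plate[i-1].isdigit(): i -= 1', expressed on the reversed suffix
def pvBStrip : List Char → List Char
  | [] => []
  | c :: cs => if PySem.Chars.isdigit c then pvBStrip cs else c :: cs

def are_numbers_at_the_end_alt (user_plate : String) : Bool :=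
  let pre := (pvBStrip user_plate.toList.reverse).reverse   -- user_plate[:i]
  !(pre.any (fun c => PySem.Chars.isdigit c))

-- ===== PRECONDITION & SPEC =====
def Spec_are_numbers_at_the_end (user_plate : String) (out : Bool) : Prop := out = are_numbers_at_the_end_alt user_plate
instance (user_plate : String) (out : Bool) : Decidable (Spec_are_numbers_at_the_end user_plate out) := by unfold Spec_are_numbers_at_the_end; infer_instance

-- ===== CLAIM (what is proved, stated in full; the proofs are below) =====
def Claim_equal_are_numbers_at_the_end : Prop := ∀ (user_plate : String), Dom_are_numbers_at_the_end user_plate → Spec_are_numbers_at_the_end user_plate (are_numbers_at_the_end user_plate)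

-- ===== LEMMAS AND PROOFS =====
theorem pvALoop_true (cs : List Char) : pvALoop cs true = cs.all PySem.Chars.isdigit := by
  induction cs with
  | nil => rfl
  | cons c cs ih => simp only [pvALoop, List.all_cons]; split_ifs with h <;> simp [h, ih]

theorem pvALoop_false (cs : List Char) :
    pvALoop cs false = (cs.dropWhile (fun c => !PySem.Chars.isdigit c)).all PySem.Chars.isdigit := by
  induction cs with
  | nil => rfl
  | cons c cs ih =>
    by_cases h : PySem.Chars.isdigit c = true
    · simp [pvALoop, h, pvALoop_true, List.all_cons, List.dropWhile]
    · simp [pvALoop, h, ih, List.dropWhile]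

theorem pvBStrip_eq (rs : List Char) : pvBStrip rs = rs.dropWhile PySem.Chars.isdigit := by
  induction rs with
  | nil => rfl
  | cons c cs ih => by_cases h : PySem.Chars.isdigit c = true <;> simp [pvBStrip, h, ih]

theorem pv_main (cs : List Char) :
    (cs.dropWhile (fun c => !PySem.Chars.isdigit c)).all PySem.Chars.isdigit
      = !(((cs.reverse.dropWhile PySem.Chars.isdigit).reverse).any PySem.Chars.isdigit) := by
  induction cs using List.reverseRecOn with
  | nil => rfl
  | append_singleton init c ih =>
    by_cases h : PySem.Chars.isdigit c = true
    · by_cases he : (init.dropWhile (fun c => !PySem.Chars.isdigit c)) = []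
      · have hr2 : (!(List.dropWhile PySem.Chars.isdigit init.reverse).reverse.any PySem.Chars.isdigit) = true := by
          rw [← ih, he]; rfl
        simp [List.dropWhile_append, h, he]
        simpa using hr2
      · simp [List.dropWhile_append, h, he, List.all_append, ih]
    · have hh : PySem.Chars.isdigit c = false := by simpa using h
      by_cases he : (init.dropWhile (fun c => !PySem.Chars.isdigit c)) = []
      · have hany : init.any PySem.Chars.isdigit = false := by
          simp only [List.any_eq_false]
          intro x hx
          have := List.dropWhile_eq_nil_iff.mp he x hx
          simpa using this
        simp [List.dropWhile_append, hh, he, hany, List.dropWhile]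
      · have hany : init.any PySem.Chars.isdigit = true := by
          refine List.any_eq_true.mpr ⟨(init.dropWhile (fun c => !PySem.Chars.isdigit c)).head he, ?_, ?_⟩
          · exact (List.dropWhile_sublist _).mem (List.head_mem he)
          · have := List.head_dropWhile_not (p := fun c => !PySem.Chars.isdigit c) he
            simpa using this
        simp [List.dropWhile_append, hh, he, hany, List.all_append]

-- ===== VERDICT (by name: the statement is the Claim_ definition above) =====
theorem are_numbers_at_the_end_spec : Claim_equal_are_numbers_at_the_end := by
  intro s _
  unfold Spec_are_numbers_at_the_end are_numbers_at_the_end are_numbers_at_the_end_alt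
  rw [pvALoop_false, pvBStrip_eq, pv_main]
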